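-- pv_equiv track=rewrite | github.com/ketashi/Convert-decimal-binary-decimal | convert.py | dbinary
-- ===== SOURCE A (Python) =====
-- def dbinary(numbers):
--     data=""
--     content=""
--     for number in numbers:
--         data=""
--         while number:
--             if number == 1:
--                 data += str(number)
--                 break
--             else:
--                 data += str(number%2)
--                 number = number//2
--
--         data = data[::-1]
--         content += data + "."
--     content = content[:-1]
--     return content
-- ===== SOURCE B (Python) =====
-- def to_bin(n):
--     # most-significant-bit-first by recursion on n // 2; 0 (or anything <= 0) gives ""
--     return "" if n <= 0 else to_bin(n // 2) + str(n % 2)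
--
--
-- def dbinary(numbers):
--     return ".".join(to_bin(n) for n in numbers)
-- ===== Notes on version B (the rewrite author's own statement) =====
-- stated objective: simpler
-- what changed: Replaces the LSB-first while-loop with break-at-1, per-number string reversal and trailing-dot trimming by a recursive MSB-first to_bin helper joined with str.join, so no reversal and no slice fixups are needed.
import Mathlib
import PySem

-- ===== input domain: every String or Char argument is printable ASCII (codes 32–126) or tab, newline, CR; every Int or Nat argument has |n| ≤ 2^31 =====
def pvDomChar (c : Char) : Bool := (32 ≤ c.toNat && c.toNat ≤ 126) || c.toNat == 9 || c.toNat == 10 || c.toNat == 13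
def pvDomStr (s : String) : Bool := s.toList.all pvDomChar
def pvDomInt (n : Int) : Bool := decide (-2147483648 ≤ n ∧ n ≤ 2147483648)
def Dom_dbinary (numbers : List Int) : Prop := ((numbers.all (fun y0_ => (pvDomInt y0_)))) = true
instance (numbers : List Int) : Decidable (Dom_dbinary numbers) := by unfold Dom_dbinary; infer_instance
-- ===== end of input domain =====

-- B replaces A's LSB-first while loop + reversal + trailing-dot trim by an MSB-first
-- recursive to_bin helper joined with ".".join (objective: simpler).

-- ===== PORT A =====
-- A's while loop; fuel only makes the loop total (it is never exhausted when 0 ≤ number,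
-- which Pre_dbinary guarantees; on negative numbers the Python loops forever).
def dbinaryWhile : Nat → Int → String → String
  | 0, _, data => data
  | fuel + 1, number, data =>
    if number ≠ 0 then
      if number = 1 then data ++ PySem.Int.toStr number
      else dbinaryWhile fuel (PySem.Int.floordiv number 2)
             (data ++ PySem.Int.toStr (PySem.Int.mod number 2))
    else data

def dbinary (numbers : List Int) : String :=
  let content := numbers.foldl (fun content number =>
    let data := dbinaryWhile (number.natAbs + 1) number ""
    let data := (PySem.Str.slice? data none none (-1)).getD ""   -- data[::-1]
    content ++ (data ++ ".")) ""
  PySem.Str.slice content none (some (-1))                        -- content[:-1]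

-- ===== PORT B =====
def toBinRec (n : Int) : String :=
  if _h : n ≤ 0 then ""
  else toBinRec (PySem.Int.floordiv n 2) ++ PySem.Int.toStr (PySem.Int.mod n 2)
termination_by n.toNat
decreasing_by
  have h1 : PySem.Int.floordiv n 2 = n / 2 := PySem.Int.floordiv_eq_ediv_of_pos (by omega)
  rw [h1]; omega

def dbinary_alt (numbers : List Int) : String :=
  PySem.Str.join "." (numbers.map toBinRec)

-- ===== PRECONDITION & SPEC =====
-- Pre_ excludes lists containing a negative number: there the Python A never returns
-- (its while loop runs forever, since n//2 stays at -1).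
def Pre_dbinary (numbers : List Int) : Prop := ∀ n ∈ numbers, 0 ≤ n
instance (numbers : List Int) : Decidable (Pre_dbinary numbers) := by unfold Pre_dbinary; infer_instance
def pvWitness_dbinary : List Int := [5, 0, 10, 1]
def Spec_dbinary (numbers : List Int) (out : String) : Prop := out = dbinary_alt numbers
instance (numbers : List Int) (out : String) : Decidable (Spec_dbinary numbers out) := by unfold Spec_dbinary; infer_instance

-- ===== CLAIM =====
def Claim_equal_dbinary : Prop := ∀ (numbers : List Int), Dom_dbinary numbers → Pre_dbinary numbers → Spec_dbinary numbers (dbinary numbers)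

-- ===== LEMMAS AND PROOFS =====

theorem toBinRec_nonpos (n : Int) (h : n ≤ 0) : toBinRec n = "" := by
  rw [toBinRec]; simp [h]

theorem dbinaryWhile_toList (fuel : Nat) :
    ∀ (n : Int) (data : String), 0 ≤ n → n.toNat ≤ fuel →
      (dbinaryWhile fuel n data).toList = data.toList ++ (toBinRec n).toList.reverse := by
  induction fuel with
  | zero =>
    intro n data h0 hf
    have : n = 0 := by omega
    subst this
    simp [dbinaryWhile, toBinRec_nonpos 0 le_rfl]
  | succ f ih =>
    intro n data h0 hf
    rcases eq_or_lt_of_le h0 with h|h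
    · simp [dbinaryWhile, ← h, toBinRec_nonpos 0 le_rfl]
    · rcases eq_or_lt_of_le (by omega : (1:Int) ≤ n) with h1|h1
      · -- n = 1
        have hn : n = 1 := h1.symm
        subst hn
        have : toBinRec 1 = "1" := by
          rw [toBinRec]; norm_num
          rw [toBinRec_nonpos _ (by decide)]
          decide
        simp [dbinaryWhile, this]
        decide
      · -- n ≥ 2
        have hn2 : 2 ≤ n := by omega
        have hd : PySem.Int.floordiv n 2 = n / 2 := PySem.Int.floordiv_eq_ediv_of_pos (by omega)
        have hlt : (n / 2).toNat ≤ f := by omega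
        have hge : 0 ≤ n / 2 := by omega
        have step : dbinaryWhile (f + 1) n data =
            dbinaryWhile f (PySem.Int.floordiv n 2)
              (data ++ PySem.Int.toStr (PySem.Int.mod n 2)) := by
          simp only [dbinaryWhile]
          rw [if_pos (show ¬ n = 0 by omega), if_neg (show ¬ n = 1 by omega)]
        rw [step, hd, ih _ _ hge hlt]
        have hb : toBinRec n = toBinRec (n / 2) ++ PySem.Int.toStr (PySem.Int.mod n 2) := by
          rw [toBinRec]
          simp only [hd]
          rw [dif_neg (by omega)]
        rw [hb]
        have hrev : (PySem.Int.toChars (n % 2)).reverse = PySem.Int.toChars (n % 2) := by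
          have hm : n % 2 = 0 ∨ n % 2 = 1 := by omega
          rcases hm with h|h <;> rw [h] <;> decide
        simp [hrev]

theorem perNumber (n : Int) (h : 0 ≤ n) :
    (PySem.Str.slice? (dbinaryWhile (n.natAbs + 1) n "") none none (-1)).getD ""
      = toBinRec n := by
  rw [PySem.Str.slice?_none_none_neg_one]
  simp only [Option.getD_some]
  rw [dbinaryWhile_toList (n.natAbs + 1) n "" h (by omega)]
  simp [String.ofList]

theorem foldl_toList (numbers : List Int) :
    ∀ (init : String), (∀ n ∈ numbers, 0 ≤ n) →
      (numbers.foldl (fun content number =>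
        let data := dbinaryWhile (number.natAbs + 1) number ""
        let data := (PySem.Str.slice? data none none (-1)).getD ""
        content ++ (data ++ ".")) init).toList
      = init.toList ++ (numbers.map (fun n => (toBinRec n).toList ++ ['.'])).flatten := by
  induction numbers with
  | nil => intro init _; simp
  | cons n t ih =>
    intro init hpre
    simp only [List.foldl_cons, List.map_cons, List.flatten_cons]
    rw [ih _ (fun m hm => hpre m (List.mem_cons_of_mem _ hm))]
    rw [perNumber n (hpre n (List.mem_cons_self ..))]
    simp

theorem dropLast_dots (bs : List (List Char)) :
    ((bs.map (fun b => b ++ ['.'])).flatten).dropLast = PySem.Chars.join ['.'] bs := by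
  induction bs with
  | nil => simp [PySem.Chars.join_nil]
  | cons b t ih =>
    cases t with
    | nil => simp [PySem.Chars.join_singleton]
    | cons b' t' =>
      rw [PySem.Chars.join_cons_cons, ← ih]
      simp only [List.map_cons, List.flatten_cons]
      rw [List.dropLast_append_of_ne_nil (by simp)]

-- ===== VERDICT =====
theorem dbinary_spec : Claim_equal_dbinary := by
  intro numbers _ hpre
  unfold Spec_dbinary dbinary dbinary_alt
  apply String.toList_injective
  simp only []
  rw [PySem.Str.slice_to_neg_one]  -- hope: content[:-1] toList = dropLast
  rw [foldl_toList numbers "" hpre]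
  have hj : (PySem.Str.join "." (numbers.map toBinRec)).toList
      = PySem.Chars.join ['.'] ((numbers.map toBinRec).map String.toList) := by
    simp [PySem.Str.toList_join]
  rw [hj]
  rw [← dropLast_dots ((numbers.map toBinRec).map String.toList)]
  simp [List.map_map, Function.comp_def]
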